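-- pv_equiv track=rewrite | github.com/Carrotlord/OliverChu-dot-com | DjangoMint.py | mangleStrings
-- ===== SOURCE A (Python) =====
-- def mangleStrings(code):
--     # Base case
--     if '"' not in code and "'" not in code:
--         return code
--     def plusOne(char):
--         return chr(ord(char) + 1)
--     isInsideQuotes = False
--     isInsideDoubleQuotes = False
--     buffer = ""
--     for eachChar in code:
--         if isInsideQuotes:
--             if eachChar == "'":
--                 isInsideQuotes = False
--                 continue
--             else:
--                 buffer += plusOne(eachChar)
--         elif isInsideDoubleQuotes:
--             if eachChar == '"':
--                 isInsideDoubleQuotes = False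
--                 continue
--             else:
--                 buffer += plusOne(eachChar)
--         else:
--             if eachChar == "'":
--                 isInsideQuotes = True
--                 continue
--             if eachChar == '"':
--                 isInsideDoubleQuotes = True
--                 continue
--             buffer += eachChar
--     return buffer
-- ===== SOURCE B (Python) =====
-- def mangleStrings(code):
--     # Base case
--     if '"' not in code and "'" not in code:
--         return code
--     def shift(s):
--         return ''.join(chr(ord(ch) + 1) for ch in s)
--     parts = []
--     rest = code
--     while rest:
--         c = rest[0]
--         if c not in "\"'":
--             parts.append(c)
--             rest = rest[1:]
--         else:
--             j = rest.find(c, 1)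
--             if j == -1:
--                 parts.append(shift(rest[1:]))
--                 rest = ""
--             else:
--                 parts.append(shift(rest[1:j]))
--                 rest = rest[j + 1:]
--     return ''.join(parts)
-- ===== Notes on version B (the rewrite author's own statement) =====
-- stated objective: alternative
-- what changed: Replaced A's per-character two-boolean-flag state machine with a find/slice pass that jumps from one quote delimiter to its matching closing quote (or end of string) and shifts whole slices at once.
import Mathlib
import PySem

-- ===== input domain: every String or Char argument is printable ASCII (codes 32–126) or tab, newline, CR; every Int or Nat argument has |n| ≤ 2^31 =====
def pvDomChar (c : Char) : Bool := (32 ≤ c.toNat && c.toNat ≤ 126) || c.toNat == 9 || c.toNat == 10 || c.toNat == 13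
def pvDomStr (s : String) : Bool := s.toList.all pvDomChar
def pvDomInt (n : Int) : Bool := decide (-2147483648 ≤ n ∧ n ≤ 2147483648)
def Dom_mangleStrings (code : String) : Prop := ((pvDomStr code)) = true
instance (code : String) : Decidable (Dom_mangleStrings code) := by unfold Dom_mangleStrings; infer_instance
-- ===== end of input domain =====

-- B replaces A's per-character two-state quote machine by a find/slice pass that jumps
-- delimiter-to-delimiter and shifts whole slices (objective: alternative decomposition).


-- ===== PORT A =====
-- chr(ord(char) + 1)
def pvPlusOne (ch : Char) : Char := Char.ofNat (ch.toNat + 1)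

-- A's for-loop over the characters with the two boolean flags and the growing buffer.
def mangleLoopA : List Char → Bool → Bool → List Char → List Char
  | [], _, _, buf => buf
  | ch :: rest, sq, dq, buf =>
    if sq then
      if ch = '\'' then mangleLoopA rest false dq buf
      else mangleLoopA rest sq dq (buf ++ [pvPlusOne ch])
    else if dq then
      if ch = '"' then mangleLoopA rest sq false buf
      else mangleLoopA rest sq dq (buf ++ [pvPlusOne ch])
    else if ch = '\'' then mangleLoopA rest true dq buf
    else if ch = '"' then mangleLoopA rest sq true buf
    else mangleLoopA rest sq dq (buf ++ [ch])

def mangleStrings (code : String) : String :=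
  if ¬ code.toList.contains '"' ∧ ¬ code.toList.contains '\'' then code
  else String.ofList (mangleLoopA code.toList false false [])

-- ===== PORT B =====
-- shift(s) = ''.join(chr(ord(ch)+1) for ch in s)
def pvShift (l : List Char) : List Char := l.map pvPlusOne

-- B's while-loop over the remaining suffix: literal chars pass through, at a quote we
-- find the matching closing quote (rest.find(c, 1)) and shift the slice between them.
def mangleLoopB : List Char → List Char
  | [] => []
  | c :: rest =>
    if c = '"' ∨ c = '\'' then
      match rest.findIdx? (· == c) with
      | none => pvShift rest
      | some j => pvShift (rest.take j) ++ mangleLoopB (rest.drop (j + 1))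
    else c :: mangleLoopB rest
termination_by l => l.length
decreasing_by
  · simp only [List.length_cons, List.length_drop]; omega
  · simp only [List.length_cons]; omega

def mangleStrings_alt (code : String) : String :=
  if ¬ code.toList.contains '"' ∧ ¬ code.toList.contains '\'' then code
  else String.ofList (mangleLoopB code.toList)

-- ===== PRECONDITION & SPEC =====
def Spec_mangleStrings (code : String) (out : String) : Prop := out = mangleStrings_alt code
instance (code : String) (out : String) : Decidable (Spec_mangleStrings code out) := by unfold Spec_mangleStrings; infer_instance

-- ===== CLAIM (what is proved, stated in full; the proofs are below) =====
def Claim_equal_mangleStrings : Prop := ∀ (code : String), Dom_mangleStrings code → Spec_mangleStrings code (mangleStrings code)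

-- ===== LEMMAS AND PROOFS =====

-- What B computes from "inside a q-quoted region": shift up to the closing q, then resume.
def insideB (q : Char) (l : List Char) (buf : List Char) : List Char :=
  match l.findIdx? (· == q) with
  | none => buf ++ pvShift l
  | some j => buf ++ pvShift (l.take j) ++ mangleLoopB (l.drop (j + 1))

theorem mangle_key : ∀ (n : Nat) (l : List Char), l.length ≤ n →
    (∀ buf, mangleLoopA l false false buf = buf ++ mangleLoopB l) ∧
    (∀ buf, mangleLoopA l true false buf = insideB '\'' l buf) ∧
    (∀ buf, mangleLoopA l false true buf = insideB '"' l buf) := by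
  intro n
  induction n with
  | zero =>
    intro l hl
    have : l = [] := List.eq_nil_of_length_eq_zero (Nat.le_zero.mp hl)
    subst this
    refine ⟨?_, ?_, ?_⟩ <;> intro buf <;>
      simp [mangleLoopA, mangleLoopB, insideB, pvShift]
  | succ n ih =>
    intro l hl
    cases l with
    | nil =>
      refine ⟨?_, ?_, ?_⟩ <;> intro buf <;>
        simp [mangleLoopA, mangleLoopB, insideB, pvShift]
    | cons ch rest =>
      have hr : rest.length ≤ n := by simpa using Nat.lt_succ_iff.mp (by simpa using hl)
      obtain ⟨ihBase, ihSq, ihDq⟩ := ih rest hr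
      refine ⟨?_, ?_, ?_⟩
      · -- base state
        intro buf
        by_cases h1 : ch = '\''
        · subst h1
          rw [show mangleLoopA ('\'' :: rest) false false buf
              = mangleLoopA rest true false buf by simp [mangleLoopA]]
          rw [ihSq buf, insideB]
          rw [show mangleLoopB ('\'' :: rest)
              = (match rest.findIdx? (· == '\'') with
                 | none => pvShift rest
                 | some j => pvShift (rest.take j) ++ mangleLoopB (rest.drop (j + 1)))
              by rw [mangleLoopB]; simp]
          cases rest.findIdx? (· == '\'') <;> simp
        · by_cases h2 : ch = '"'
          · subst h2
            rw [show mangleLoopA ('"' :: rest) false false buf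
                = mangleLoopA rest false true buf by simp [mangleLoopA]]
            rw [ihDq buf, insideB]
            rw [show mangleLoopB ('"' :: rest)
                = (match rest.findIdx? (· == '"') with
                   | none => pvShift rest
                   | some j => pvShift (rest.take j) ++ mangleLoopB (rest.drop (j + 1)))
                by rw [mangleLoopB]; simp]
            cases rest.findIdx? (· == '"') <;> simp
          · rw [show mangleLoopA (ch :: rest) false false buf
                = mangleLoopA rest false false (buf ++ [ch]) by simp [mangleLoopA, h1, h2]]
            rw [ihBase]
            rw [show mangleLoopB (ch :: rest) = ch :: mangleLoopB rest by
                rw [mangleLoopB]; simp [h1, h2]]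
            simp
      · -- inside single quotes
        intro buf
        by_cases h1 : ch = '\''
        · subst h1
          rw [show mangleLoopA ('\'' :: rest) true false buf
              = mangleLoopA rest false false buf by simp [mangleLoopA]]
          rw [ihBase buf, insideB]
          simp [List.findIdx?_cons, pvShift]
        · rw [show mangleLoopA (ch :: rest) true false buf
              = mangleLoopA rest true false (buf ++ [pvPlusOne ch]) by simp [mangleLoopA, h1]]
          rw [ihSq, insideB, insideB]
          have hne : (ch == '\'') = false := by simp [h1]
          rw [List.findIdx?_cons, hne]
          cases hfi : rest.findIdx? (· == '\'') <;> simp [pvShift]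
      · -- inside double quotes
        intro buf
        by_cases h2 : ch = '"'
        · subst h2
          rw [show mangleLoopA ('"' :: rest) false true buf
              = mangleLoopA rest false false buf by simp [mangleLoopA]]
          rw [ihBase buf, insideB]
          simp [List.findIdx?_cons, pvShift]
        · rw [show mangleLoopA (ch :: rest) false true buf
              = mangleLoopA rest false true (buf ++ [pvPlusOne ch]) by simp [mangleLoopA, h2]]
          rw [ihDq, insideB, insideB]
          have hne : (ch == '"') = false := by simp [h2]
          rw [List.findIdx?_cons, hne]
          cases hfi : rest.findIdx? (· == '"') <;> simp [pvShift]

-- ===== VERDICT (by name: the statement is the Claim_ definition above) =====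
theorem mangleStrings_spec : Claim_equal_mangleStrings := by
  intro code _
  unfold Spec_mangleStrings mangleStrings mangleStrings_alt
  split
  · rfl
  · have h := (mangle_key code.toList.length code.toList le_rfl).1 []
    rw [h]; simp
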